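-- pv_equiv track=rewrite | github.com/GoushikaJanani/WolfDrone-Search-And-Rescue | src/wolfdrone/scripts/mission/utils/utilities.py | rise_and_land
-- ===== SOURCE A (Python) =====
-- def rise_and_land(x=0,y=0):
--   wp_list = list()
--   z = 0
--   for i in range(3):
--       z=z+2
--       wp_list.append((x,y,z)) #Keep increasing by 1 m till 10 m
--   wp_list.reverse()
--   return wp_list
-- ===== SOURCE B (Python) =====
-- def rise_and_land(x=0, y=0):
--     return [(x, y, 6), (x, y, 4), (x, y, 2)]
-- ===== Notes on version B (the rewrite author's own statement) =====
-- stated objective: simpler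
-- what changed: Replaces the loop with a z accumulator plus a final reverse by directly returning the closed-form literal list of the three descending-z waypoints.
import Mathlib
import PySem

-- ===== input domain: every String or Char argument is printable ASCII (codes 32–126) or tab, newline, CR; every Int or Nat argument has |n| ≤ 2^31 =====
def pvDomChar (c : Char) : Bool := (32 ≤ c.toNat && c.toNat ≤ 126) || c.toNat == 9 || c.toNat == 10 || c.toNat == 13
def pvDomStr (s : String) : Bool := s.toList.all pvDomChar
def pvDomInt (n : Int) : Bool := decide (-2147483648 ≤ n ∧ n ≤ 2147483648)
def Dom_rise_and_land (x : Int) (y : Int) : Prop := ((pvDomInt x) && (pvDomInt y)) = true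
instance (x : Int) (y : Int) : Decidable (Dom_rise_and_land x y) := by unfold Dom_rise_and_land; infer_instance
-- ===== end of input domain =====

-- B replaces A's build-then-reverse loop by the closed-form literal list (simpler).

-- ===== PORT A =====
-- loop over range(3): state = (wp_list, z); append (x,y,z+2) each step; then reverse
def rise_and_land (x : Int) (y : Int) : List (Int × Int × Int) :=
  let st := (PySem.List.pyRange 0 3 1).foldl
    (fun (st : List (Int × Int × Int) × Int) _ =>
      let z := st.2 + 2
      (st.1 ++ [(x, y, z)], z))
    ([], 0)
  st.1.reverse

-- ===== PORT B =====
def rise_and_land_alt (x : Int) (y : Int) : List (Int × Int × Int) :=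
  [(x, y, 6), (x, y, 4), (x, y, 2)]

-- ===== PRECONDITION & SPEC =====
def Spec_rise_and_land (x : Int) (y : Int) (out : List (Int × Int × Int)) : Prop := out = rise_and_land_alt x y
instance (x : Int) (y : Int) (out : List (Int × Int × Int)) : Decidable (Spec_rise_and_land x y out) := by unfold Spec_rise_and_land; infer_instance

-- ===== CLAIM (what is proved, stated in full; the proofs are below) =====
def Claim_equal_rise_and_land : Prop := ∀ (x : Int) (y : Int), Dom_rise_and_land x y → Spec_rise_and_land x y (rise_and_land x y)

-- ===== LEMMAS AND PROOFS =====

-- ===== VERDICT (by name: the statement is the Claim_ definition above) =====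
theorem rise_and_land_spec : Claim_equal_rise_and_land := by
  intro x y _
  unfold Spec_rise_and_land rise_and_land rise_and_land_alt
  simp [PySem.List.pyRange, List.range_succ]
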